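-- pv_equiv track=rewrite | github.com/rajtyagi2718/berkeley_cs61b | Sorts2.py | _RadixSortIndex
-- ===== SOURCE A (Python) =====
-- def _RadixSortIndex(data, alphabet, k):
--     aMap = {k:v+1 for v,k in enumerate(alphabet)}
--     aMap[None] = 0
--     positions = [0 for _ in range(len(aMap))]
--     for d in data:
--         if k < -len(d) or len(d)-1 < k:
--             positions[aMap[None]] += 1
--         else:
--             positions[aMap[d[k]]] += 1
--     sum = 0
--     for i in range(len(positions)):
--         positions[i], sum = sum, sum + positions[i]
--     result = [None for _ in range(len(data))]
--     for d in data: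
--         if k < -len(d) or len(d)-1 < k:
--             i = aMap[None]
--         else:
--             i = aMap[d[k]]
--         p = positions[i]
--         result[p] = d
--         positions[i] += 1
--     return result
-- ===== SOURCE B (Python) =====
-- def _RadixSortIndex(data, alphabet, k):
--     aMap = {c: v + 1 for v, c in enumerate(alphabet)}
--     aMap[None] = 0
--     buckets = [[] for _ in range(len(aMap))]
--     for d in data:
--         if k < -len(d) or len(d) - 1 < k:
--             buckets[aMap[None]].append(d)
--         else:
--             buckets[aMap[d[k]]].append(d)
--     result = []
--     for b in buckets:
--         result.extend(b)
--     return result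
-- ===== Notes on version B (the rewrite author's own statement) =====
-- stated objective: simpler
-- what changed: Replaces the count/prefix-sum/indexed-placement counting-sort machinery with explicit per-key buckets filled in one stable pass and concatenated in key order.
import Mathlib
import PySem

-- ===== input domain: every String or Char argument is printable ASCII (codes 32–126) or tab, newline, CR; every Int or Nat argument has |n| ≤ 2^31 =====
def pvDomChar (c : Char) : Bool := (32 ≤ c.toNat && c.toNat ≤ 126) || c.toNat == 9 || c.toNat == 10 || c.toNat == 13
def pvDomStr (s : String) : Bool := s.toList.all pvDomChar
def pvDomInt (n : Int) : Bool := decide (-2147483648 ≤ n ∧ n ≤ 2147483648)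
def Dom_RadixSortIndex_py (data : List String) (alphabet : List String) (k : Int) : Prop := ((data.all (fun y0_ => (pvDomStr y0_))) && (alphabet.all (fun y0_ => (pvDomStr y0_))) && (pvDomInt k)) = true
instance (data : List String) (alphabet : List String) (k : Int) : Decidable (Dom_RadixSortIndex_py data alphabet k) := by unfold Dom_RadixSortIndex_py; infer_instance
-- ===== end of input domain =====

-- B replaces A's count/prefix-sum/indexed-placement counting sort by explicit per-key buckets
-- filled in one stable pass and concatenated in key order (same result, simpler structure).

-- ===== PORT A =====
-- shared helper: the dict comprehension {k: v+1 for v, k in enumerate(alphabet)} followed by aMap[None] = 0,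
-- identical lines in A and B (keys: `some s.toList` for a string key, `none` for Python's None)
def pvAMap (alphabet : List String) : PySem.Dict (Option (List Char)) Int :=
  ((PySem.List.enumerate alphabet).foldl
    (fun m p => m.insert (some p.2.toList) (p.1 + 1)) PySem.Dict.empty).insert none 0

def RadixSortIndex_py (data : List String) (alphabet : List String) (k : Int) : List String :=
  let aMap := pvAMap alphabet
  let positions : List Int := List.replicate aMap.size 0
  let positions := data.foldl (fun ps d =>
    if k < -(PySem.Str.len d) ∨ PySem.Str.len d - 1 < k then
      PySem.List.pySetD ps (aMap.getD none 0) (PySem.List.pyGetD ps (aMap.getD none 0) 0 + 1)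
    else
      PySem.List.pySetD ps (aMap.getD ((PySem.Str.pyGet? d k).map (fun c => [c])) 0)
        (PySem.List.pyGetD ps (aMap.getD ((PySem.Str.pyGet? d k).map (fun c => [c])) 0) 0 + 1)) positions
  let st := (PySem.List.pyRange 0 (positions.length : Int)).foldl
    (fun st i => (PySem.List.pySetD st.1 i st.2, st.2 + PySem.List.pyGetD st.1 i 0)) (positions, (0 : Int))
  let positions := st.1
  let result : List (Option String) := List.replicate data.length none
  let st2 := data.foldl (fun st d =>
    let i : Int := if k < -(PySem.Str.len d) ∨ PySem.Str.len d - 1 < k then aMap.getD none 0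
      else aMap.getD ((PySem.Str.pyGet? d k).map (fun c => [c])) 0
    let p := PySem.List.pyGetD st.2 i 0
    (PySem.List.pySetD st.1 p (some d), PySem.List.pySetD st.2 i (p + 1))) (result, positions)
  -- Python's result slots are all filled whenever the function returns; `.getD ""` only discharges the Option type
  st2.1.map (fun o => o.getD "")

-- ===== PORT B =====
def RadixSortIndex_py_alt (data : List String) (alphabet : List String) (k : Int) : List String :=
  let aMap := pvAMap alphabet
  let buckets : List (List String) := List.replicate aMap.size []
  let buckets := data.foldl (fun bs d =>
    if k < -(PySem.Str.len d) ∨ PySem.Str.len d - 1 < k then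
      PySem.List.pySetD bs (aMap.getD none 0) (PySem.List.pyGetD bs (aMap.getD none 0) [] ++ [d])
    else
      PySem.List.pySetD bs (aMap.getD ((PySem.Str.pyGet? d k).map (fun c => [c])) 0)
        (PySem.List.pyGetD bs (aMap.getD ((PySem.Str.pyGet? d k).map (fun c => [c])) 0) [] ++ [d])) buckets
  buckets.foldl (fun acc b => acc ++ b) []

-- ===== PRECONDITION & SPEC =====
-- the index one past the LAST occurrence of s in alphabet (counted from the front), Python's aMap[s]
def pvLastIdx (alphabet : List String) (s : String) : Nat :=
  alphabet.length - 1 - alphabet.reverse.idxOf s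

-- Pre_ excludes exactly the inputs on which A raises: KeyError when some in-range k-th character is
-- not an alphabet letter, and IndexError when it is a letter whose last-occurrence index reaches past
-- the counting array (whose length is the number of DISTINCT alphabet letters plus one).
def Pre_RadixSortIndex_py (data : List String) (alphabet : List String) (k : Int) : Prop :=
  ∀ d ∈ data, ((PySem.Str.pyGet? d k).all (fun c =>
    decide (String.ofList [c] ∈ alphabet)
      && decide (pvLastIdx alphabet (String.ofList [c]) < (PySem.List.dedup alphabet).length))) = true
instance (data : List String) (alphabet : List String) (k : Int) : Decidable (Pre_RadixSortIndex_py data alphabet k) := by unfold Pre_RadixSortIndex_py; infer_instance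

def pvWitness_RadixSortIndex_py : List String × List String × Int := (["ab", "b", ""], ["a", "b"], 0)

def Spec_RadixSortIndex_py (data : List String) (alphabet : List String) (k : Int) (out : List String) : Prop := out = RadixSortIndex_py_alt data alphabet k
instance (data : List String) (alphabet : List String) (k : Int) (out : List String) : Decidable (Spec_RadixSortIndex_py data alphabet k out) := by unfold Spec_RadixSortIndex_py; infer_instance

-- ===== CLAIM (what is proved, stated in full; the proofs are below) =====
def Claim_equal_RadixSortIndex_py : Prop := ∀ (data : List String) (alphabet : List String) (k : Int), Dom_RadixSortIndex_py data alphabet k → Pre_RadixSortIndex_py data alphabet k → Spec_RadixSortIndex_py data alphabet k (RadixSortIndex_py data alphabet k)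

-- ===== LEMMAS AND PROOFS =====

-- proof-side helpers ---------------------------------------------------------

-- the (Int) bucket index both ports compute for an element d
def pvIdx (alphabet : List String) (k : Int) (d : String) : Int :=
  if k < -(PySem.Str.len d) ∨ PySem.Str.len d - 1 < k then (pvAMap alphabet).getD none 0
  else (pvAMap alphabet).getD ((PySem.Str.pyGet? d k).map (fun c => [c])) 0

def pvKey (alphabet : List String) (k : Int) (d : String) : Nat := (pvIdx alphabet k d).toNat

def pvCnt (key : String → Nat) (l : List String) (i : Nat) : Nat :=
  (l.filter (fun x => key x == i)).length

def pvOff (c : Nat → Nat) (j : Nat) : Nat := ((List.range j).map c).sum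

def pvOffR (c : Nat → Nat) (a j : Nat) : Nat := ((List.range' a (j - a)).map c).sum

def pvSeg (key : String → Nat) (c : Nat → Nat) (p : List String) (i : Nat) : List (Option String) :=
  ((p.filter (fun x => key x == i)).map some) ++ List.replicate (c i - pvCnt key p i) none

def pvSegs (key : String → Nat) (c : Nat → Nat) (p : List String) (a n : Nat) : List (Option String) :=
  ((List.range' a n).map (pvSeg key c p)).flatten

-- small generic lemmas -------------------------------------------------------

lemma pv_map_range_set {α : Type} (m : Nat) (g : Nat → α) (n : Nat) (v : α) (hn : n < m) :
    ((List.range m).map g).set n v = (List.range m).map (fun i => if i = n then v else g i) := by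
  apply List.ext_getElem
  · simp
  · intro i h1 h2
    simp only [List.getElem_set, List.getElem_map, List.getElem_range]
    simp only [List.length_map, List.length_range] at h1
    by_cases h : n = i <;> simp [h] <;> omega

lemma pv_map_range_getD {α : Type} (m : Nat) (g : Nat → α) (n : Nat) (d : α) (hn : n < m) :
    ((List.range m).map g).getD n d = g n := by
  rw [List.getD_eq_getElem?_getD]
  simp [List.getElem?_map, List.getElem?_range, hn]

lemma pv_pySetD_natCast {α : Type} (xs : List α) (n : Nat) (v : α) (h : n < xs.length) :
    PySem.List.pySetD xs (n : Int) v = xs.set n v := by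
  simp [PySem.List.pySetD, PySem.List.pySet?_natCast xs n v h]

lemma pv_pyGetD_natCast {α : Type} (xs : List α) (n : Nat) (d : α) :
    PySem.List.pyGetD xs (n : Int) d = xs.getD n d := by
  rw [PySem.List.pyGetD_of_nonneg xs d (by positivity)]
  simp

lemma pv_foldl_count (l : List String) (s : Int) :
    l.foldl (fun a _ => a + 1) s = s + l.length := by
  induction l generalizing s with
  | nil => simp
  | cons x t ih => simp [ih]; push_cast; ring

lemma pv_foldl_app {α : Type} (l : List α) (s : List α) :
    l.foldl (fun a d => a ++ [d]) s = s ++ l := by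
  rw [PySem.List.foldl_append_eq_flatMap (fun d => [d]) l s]
  simp

lemma pv_sum_map_add (is : List Nat) (f g : Nat → Nat) :
    (is.map (fun i => f i + g i)).sum = (is.map f).sum + (is.map g).sum := by
  induction is with
  | nil => simp
  | cons x t ih => simp [ih]; omega

lemma pv_sum_ite (m n : Nat) (hn : n < m) :
    ((List.range m).map (fun i => if n = i then 1 else 0)).sum = 1 := by
  induction m with
  | zero => omega
  | succ m ih =>
    rw [List.range_succ, List.map_append, List.sum_append]
    by_cases h : n < m
    · have hlast : (if n = m then (1:Nat) else 0) = 0 := by simp; omega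
      simp [ih h, hlast]
    · have hn' : n = m := by omega
      subst hn'
      have hzero : ((List.range n).map (fun i => if n = i then (1:Nat) else 0)).sum = 0 := by
        apply List.sum_eq_zero
        intro x hx
        simp only [List.mem_map, List.mem_range] at hx
        obtain ⟨i, hi, rfl⟩ := hx
        simp; omega
      simp [hzero]

-- counting / bucket folds ----------------------------------------------------

lemma pv_cnt_cons (key : String → Nat) (x : String) (t : List String) (i : Nat) :
    pvCnt key (x :: t) i = (if key x = i then 1 else 0) + pvCnt key t i := by
  simp only [pvCnt, List.filter_cons]
  by_cases h : key x = i <;> simp [h] <;> omega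

lemma pv_cnt_append_same (key : String → Nat) (p : List String) (d : String) :
    pvCnt key (p ++ [d]) (key d) = pvCnt key p (key d) + 1 := by
  simp [pvCnt, List.filter_append]

lemma pv_cnt_append_ne (key : String → Nat) (p : List String) (d : String) (i : Nat)
    (h : key d ≠ i) : pvCnt key (p ++ [d]) i = pvCnt key p i := by
  simp [pvCnt, List.filter_append, h]

lemma pv_sum_cnt (key : String → Nat) (m : Nat) :
    ∀ (l : List String), (∀ x ∈ l, key x < m) →
      ((List.range m).map (pvCnt key l)).sum = l.length := by
  intro l
  induction l with
  | nil =>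
    intro _
    rw [show (pvCnt key ([] : List String)) = (fun _ => 0) from funext (fun i => by simp [pvCnt])]
    simp
  | cons x t ih =>
    intro h
    have hx : key x < m := h x (by simp)
    have hmc : (List.range m).map (pvCnt key (x :: t))
        = (List.range m).map (fun i => (if key x = i then 1 else 0) + pvCnt key t i) := by
      apply List.map_congr_left; intro i _; exact pv_cnt_cons key x t i
    rw [hmc, pv_sum_map_add, pv_sum_ite m (key x) hx, ih (fun y hy => h y (by simp [hy]))]
    simp; omega

lemma pv_foldl_key {β : Type} (key : String → Nat) (m : Nat) (f : β → String → β) (d0 : β) :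
    ∀ (l : List String) (g : Nat → β), (∀ x ∈ l, key x < m) →
      l.foldl (fun s d => PySem.List.pySetD s ((key d : Nat) : Int)
          (f (PySem.List.pyGetD s ((key d : Nat) : Int) d0) d)) ((List.range m).map g)
        = (List.range m).map (fun i => (l.filter (fun x => key x == i)).foldl f (g i)) := by
  intro l
  induction l with
  | nil => intro g _; simp
  | cons x t ih =>
    intro g h
    have hx : key x < m := h x (by simp)
    have hlen : key x < ((List.range m).map g).length := by simpa using hx
    rw [List.foldl_cons, pv_pySetD_natCast _ _ _ hlen, pv_pyGetD_natCast,
      pv_map_range_getD m g (key x) d0 hx, pv_map_range_set m g (key x) _ hx,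
      ih _ (fun y hy => h y (by simp [hy]))]
    apply List.map_congr_left
    intro i hi
    simp only [List.filter_cons]
    by_cases hxi : key x = i
    · subst hxi
      simp
    · have : (key x == i) = false := by simp [hxi]
      simp [this, hxi, Ne.symm hxi]

-- the prefix-sum loop --------------------------------------------------------

lemma pv_off_succ (c : Nat → Nat) (j : Nat) : pvOff c (j + 1) = pvOff c j + c j := by
  simp [pvOff, List.range_succ]

lemma pv_off_mono (c : Nat → Nat) (a : Nat) : ∀ b : Nat, a ≤ b → pvOff c a ≤ pvOff c b := by
  intro b
  induction b with
  | zero =>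
    intro h
    have : a = 0 := by omega
    subst this
    exact le_refl _
  | succ b ih =>
    intro h
    by_cases h2 : a ≤ b
    · exact le_trans (ih h2) (by rw [pv_off_succ]; omega)
    · have : a = b + 1 := by omega
      subst this; rfl

lemma pv_prefix (c : Nat → Nat) (m : Nat) :
    ∀ (n a : Nat), a + n = m →
      (PySem.List.pyRange (a : Int) (m : Int)).foldl
          (fun st i => (PySem.List.pySetD st.1 i st.2, st.2 + PySem.List.pyGetD st.1 i 0))
          ((List.range m).map (fun i => if i < a then (pvOff c i : Int) else (c i : Int)),
            (pvOff c a : Int))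
        = ((List.range m).map (fun i => (pvOff c i : Int)), (pvOff c m : Int)) := by
  intro n
  induction n with
  | zero =>
    intro a ha
    have ham : a = m := by omega
    subst ham
    rw [PySem.List.pyRange_one_eq_nil (by omega)]
    simp only [List.foldl_nil]
    have hmap : (List.range a).map (fun i => if i < a then (pvOff c i : Int) else (c i : Int))
        = (List.range a).map (fun i => (pvOff c i : Int)) := by
      apply List.map_congr_left
      intro i hi
      simp only [List.mem_range] at hi
      simp [hi]
    rw [hmap]
  | succ n ih =>
    intro a ha
    have ham : a < m := by omega
    rw [PySem.List.pyRange_one_cons (by exact_mod_cast ham), List.foldl_cons]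
    have hlen : a < ((List.range m).map (fun i => if i < a then (pvOff c i : Int) else (c i : Int))).length := by
      simpa using ham
    rw [pv_pySetD_natCast _ _ _ hlen, pv_pyGetD_natCast,
      pv_map_range_getD m _ a 0 ham, pv_map_range_set m _ a _ ham]
    have hmap : (List.range m).map (fun i => if i = a then (pvOff c a : Int)
          else if i < a then (pvOff c i : Int) else (c i : Int))
        = (List.range m).map (fun i => if i < a + 1 then (pvOff c i : Int) else (c i : Int)) := by
      apply List.map_congr_left
      intro i _
      by_cases h1 : i = a
      · simp [h1]
      · by_cases h2 : i < a <;> simp [h1, h2] <;> omega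
    have hval : (if a < a then (pvOff c a : Int) else (c a : Int)) = (c a : Int) := by simp
    have hsum : (pvOff c a : Int) + (c a : Int) = ((pvOff c (a + 1) : Nat) : Int) := by
      rw [pv_off_succ]; push_cast; ring
    have hcast : ((a : Int) + 1) = ((a + 1 : Nat) : Int) := by push_cast; ring
    rw [hmap, hval, hsum, hcast, ih (a + 1) (by omega)]

-- segment representation of A's result array ---------------------------------

lemma pv_seg_len (key : String → Nat) (c : Nat → Nat) (p : List String) (i : Nat)
    (h : pvCnt key p i ≤ c i) : (pvSeg key c p i).length = c i := by
  simp only [pvSeg, List.length_append, List.length_map, List.length_replicate]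
  have : (p.filter (fun x => key x == i)).length = pvCnt key p i := rfl
  omega

lemma pv_seg_append_ne (key : String → Nat) (c : Nat → Nat) (p : List String) (d : String)
    (i : Nat) (h : key d ≠ i) : pvSeg key c (p ++ [d]) i = pvSeg key c p i := by
  have hf : (key d == i) = false := by simp [h]
  simp [pvSeg, pvCnt, List.filter_append, hf]

lemma pv_segs_len (key : String → Nat) (c : Nat → Nat) (p : List String)
    (h : ∀ i, pvCnt key p i ≤ c i) :
    ∀ (n a : Nat), (pvSegs key c p a n).length = ((List.range' a n).map c).sum := by
  intro n
  induction n with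
  | zero => intro a; simp [pvSegs]
  | succ n ih =>
    intro a
    simp only [pvSegs, List.range'_succ, List.map_cons, List.flatten_cons,
      List.length_append, List.sum_cons]
    rw [pv_seg_len key c p a (h a)]
    have h2 := ih (a + 1)
    rw [pvSegs] at h2
    omega

lemma pv_offR_self (c : Nat → Nat) (j : Nat) : pvOffR c j j = 0 := by
  simp [pvOffR]

lemma pv_offR_step (c : Nat → Nat) (a j : Nat) (h : a < j) :
    pvOffR c a j = c a + pvOffR c (a + 1) j := by
  have h1 : j - a = (j - (a + 1)) + 1 := by omega
  rw [pvOffR, h1, List.range'_succ, List.map_cons, List.sum_cons, pvOffR]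

lemma pv_set_segs (key : String → Nat) (c : Nat → Nat) (p : List String) (d : String) (j : Nat)
    (hle : ∀ i, pvCnt key p i ≤ c i) (hlt : pvCnt key p j < c j) (hkd : key d = j) :
    ∀ (n a : Nat), a ≤ j → j < a + n →
      (pvSegs key c p a n).set (pvOffR c a j + pvCnt key p j) (some d)
        = pvSegs key c (p ++ [d]) a n := by
  intro n
  induction n with
  | zero => intro a h1 h2; omega
  | succ n ih =>
    intro a h1 h2
    rw [pvSegs, pvSegs, List.range'_succ, List.map_cons, List.map_cons,
      List.flatten_cons, List.flatten_cons, List.set_append]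
    by_cases haj : a = j
    · subst haj
      rw [pv_offR_self]
      have hseglen : (pvSeg key c p a).length = c a := pv_seg_len key c p a (hle a)
      have hidx : 0 + pvCnt key p a < (pvSeg key c p a).length := by omega
      rw [if_pos hidx]
      congr 1
      · -- set inside the a-th segment
        obtain ⟨r, hr⟩ : ∃ r, c a - pvCnt key p a = r + 1 := ⟨c a - pvCnt key p a - 1, by omega⟩
        have hflen : (List.filter (fun x => key x == a) p).length = pvCnt key p a := rfl
        rw [pvSeg, hr, List.replicate_succ, List.set_append]
        rw [if_neg (by rw [List.length_map, hflen]; omega)]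
        have hz : 0 + pvCnt key p a - ((List.filter (fun x => key x == a) p).map some).length = 0 := by
          rw [List.length_map, hflen]; omega
        rw [hz, List.set_cons_zero]
        have hfd : (key d == a) = true := by simp [hkd]
        have hfilter : List.filter (fun x => key x == a) (p ++ [d])
            = List.filter (fun x => key x == a) p ++ [d] := by
          rw [List.filter_append]; simp [hfd]
        have hc2 := pv_cnt_append_same key p d
        rw [hkd] at hc2
        have hcnt : c a - pvCnt key (p ++ [d]) a = r := by rw [hc2]; omega
        rw [pvSeg, hfilter, hcnt, List.map_append]
        simp
      · -- segments right of j are untouched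
        apply congrArg
        apply List.map_congr_left
        intro i hi
        have : a + 1 ≤ i := (List.mem_range'_1.mp hi).1
        exact (pv_seg_append_ne key c p d i (by omega)).symm
    · have haj' : a < j := by omega
      have hseglen : (pvSeg key c p a).length = c a := pv_seg_len key c p a (hle a)
      have hge : ¬ (pvOffR c a j + pvCnt key p j < (pvSeg key c p a).length) := by
        rw [hseglen, pv_offR_step c a j haj']; omega
      rw [if_neg hge]
      congr 1
      · exact (pv_seg_append_ne key c p d a (by omega)).symm
      · have hidx : pvOffR c a j + pvCnt key p j - (pvSeg key c p a).length
            = pvOffR c (a + 1) j + pvCnt key p j := by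
          rw [hseglen, pv_offR_step c a j haj']; omega
        rw [hidx]
        have := ih (a + 1) (by omega) (by omega)
        rw [pvSegs, pvSegs] at this
        exact this

-- the placement loop ---------------------------------------------------------

lemma pv_place (key : String → Nat) (m : Nat) (c : Nat → Nat)
    (hoffm : ∀ j, j < m → pvOff c (j + 1) ≤ pvOff c m)
    (hsum : pvOff c m = ((List.range' 0 m).map c).sum) :
    ∀ (rest p : List String), (∀ x ∈ rest, key x < m) →
      (∀ i, pvCnt key p i + pvCnt key rest i = c i) →
      rest.foldl (fun st d =>
          (PySem.List.pySetD st.1 (PySem.List.pyGetD st.2 ((key d : Nat) : Int) 0) (some d),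
            PySem.List.pySetD st.2 ((key d : Nat) : Int)
              (PySem.List.pyGetD st.2 ((key d : Nat) : Int) 0 + 1)))
        (pvSegs key c p 0 m, (List.range m).map (fun i => ((pvOff c i + pvCnt key p i : Nat) : Int)))
      = (pvSegs key c (p ++ rest) 0 m,
          (List.range m).map (fun i => ((pvOff c i + pvCnt key (p ++ rest) i : Nat) : Int))) := by
  intro rest
  induction rest with
  | nil => intro p _ _; simp
  | cons d t ih =>
    intro p hk hc
    have hj : key d < m := hk d (by simp)
    have hcnt_cons : ∀ i, pvCnt key (d :: t) i = (if key d = i then 1 else 0) + pvCnt key t i :=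
      fun i => pv_cnt_cons key d t i
    have hple : ∀ i, pvCnt key p i ≤ c i := by
      intro i; have := hc i; omega
    have hplt : pvCnt key p (key d) < c (key d) := by
      have := hc (key d); have := hcnt_cons (key d); simp at this; omega
    rw [List.foldl_cons]
    have hlen2 : key d < ((List.range m).map
        (fun i => ((pvOff c i + pvCnt key p i : Nat) : Int))).length := by simpa using hj
    rw [pv_pyGetD_natCast, pv_map_range_getD m _ (key d) 0 hj]
    have hreslen : pvOff c (key d) + pvCnt key p (key d) < (pvSegs key c p 0 m).length := by
      rw [pv_segs_len key c p hple m 0, ← hsum]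
      have h1 : pvOff c (key d) + pvCnt key p (key d) < pvOff c (key d + 1) := by
        rw [pv_off_succ]; omega
      have h2 := hoffm (key d) hj
      omega
    have hcast : ((pvOff c (key d) + pvCnt key p (key d) : Nat) : Int)
        = (((pvOff c (key d) + pvCnt key p (key d) : Nat) : Nat) : Int) := by push_cast; ring
    rw [pv_pySetD_natCast _ _ _ (by simpa using hreslen)]
    have hoffR : pvOffR c 0 (key d) = pvOff c (key d) := by
      rw [pvOffR, pvOff, Nat.sub_zero, List.range_eq_range']
    have hset := pv_set_segs key c p d (key d) hple hplt rfl m 0 (by omega) (by omega)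
    rw [hoffR] at hset
    rw [hset]
    have hsucc : ((pvOff c (key d) + pvCnt key p (key d) : Nat) : Int) + 1
        = ((pvOff c (key d) + pvCnt key (p ++ [d]) (key d) : Nat) : Int) := by
      rw [pv_cnt_append_same key p d]; push_cast; ring
    rw [pv_pySetD_natCast _ _ _ hlen2, hsucc, pv_map_range_set m _ (key d) _ hj]
    have hmap : (List.range m).map (fun i => if i = key d
          then ((pvOff c (key d) + pvCnt key (p ++ [d]) (key d) : Nat) : Int)
          else ((pvOff c i + pvCnt key p i : Nat) : Int))
        = (List.range m).map (fun i => ((pvOff c i + pvCnt key (p ++ [d]) i : Nat) : Int)) := by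
      apply List.map_congr_left
      intro i _
      by_cases h : i = key d
      · subst h; simp
      · rw [if_neg h, pv_cnt_append_ne key p d i (Ne.symm h)]
    rw [hmap]
    have hc' : ∀ i, pvCnt key (p ++ [d]) i + pvCnt key t i = c i := by
      intro i
      by_cases h : key d = i
      · subst h
        rw [pv_cnt_append_same key p d]
        have := hc (key d); have := hcnt_cons (key d); simp at this; omega
      · rw [pv_cnt_append_ne key p d i h]
        have := hc i; have h2 := hcnt_cons i; rw [if_neg h] at h2; omega
    have := ih (p ++ [d]) (fun y hy => hk y (by simp [hy])) hc'
    rw [this]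
    simp

-- initial states -------------------------------------------------------------

lemma pv_replicate_eq_map {α : Type} (m : Nat) (x : α) :
    List.replicate m x = (List.range m).map (fun _ => x) := by
  rw [List.map_const', List.length_range]

lemma pv_flatten_replicate (c : Nat → Nat) :
    ∀ (is : List Nat),
      ((is.map (fun i => List.replicate (c i) (none : Option String))).flatten)
        = List.replicate ((is.map c).sum) none := by
  intro is
  induction is with
  | nil => simp
  | cons x t ih =>
    rw [List.map_cons, List.flatten_cons, ih, List.map_cons, List.sum_cons, List.replicate_add]

-- the dict {k: v+1 for v, k in enumerate(alphabet)} ∪ {None: 0} --------------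

lemma pv_enum_get? (s : String) (al : List String) :
    ∀ (st : Int) (d0 : PySem.Dict (Option (List Char)) Int),
      ((PySem.List.enumerate al st).foldl
          (fun m p => m.insert (some p.2.toList) (p.1 + 1)) d0).get? (some s.toList)
        = if s ∈ al then some (st + (al.length : Int) - (al.reverse.idxOf s : Int))
          else d0.get? (some s.toList) := by
  induction al using List.reverseRecOn with
  | nil => intro st d0; simp
  | append_singleton init a ih =>
    intro st d0
    rw [PySem.List.enumerate_append, List.foldl_append, PySem.List.enumerate_cons]
    have henil : PySem.List.enumerate ([] : List String) (st + (init.length : Int) + 1) = [] := by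
      simp
    rw [henil, List.foldl_cons, List.foldl_nil, PySem.Dict.get?_insert]
    by_cases hsa : s = a
    · subst hsa
      rw [if_pos rfl]
      have hmem : s ∈ init ++ [s] := by simp
      rw [if_pos hmem, List.reverse_append]
      have hidx : List.idxOf s ([s].reverse ++ init.reverse) = 0 := by simp
      rw [hidx]
      simp only [List.length_append, List.length_cons, List.length_nil]
      push_cast
      congr 1
      omega
    · have hne : (some s.toList : Option (List Char)) ≠ some a.toList := by
        intro h
        apply hsa
        have : s.toList = a.toList := by injection h
        have h2 := congrArg String.ofList this
        simpa [String.ofList_toList] using h2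
      rw [if_neg hne, ih st d0, List.reverse_append]
      have hidx : List.idxOf s ([a].reverse ++ init.reverse) = List.idxOf s init.reverse + 1 := by
        simp only [List.reverse_cons, List.reverse_nil, List.nil_append, List.singleton_append,
          List.idxOf_cons]
        have : (a == s) = false := by simp [Ne.symm hsa]
        simp [this]
      have hmem : s ∈ init ++ [a] ↔ s ∈ init := by simp [hsa]
      by_cases hsin : s ∈ init
      · rw [if_pos hsin, if_pos (hmem.mpr hsin), hidx]
        simp only [List.length_append, List.length_cons, List.length_nil]
        push_cast
        congr 1
        omega
      · rw [if_neg hsin, if_neg (fun h => hsin (hmem.mp h))]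

lemma pv_aMap_get?_some (alphabet : List String) (s : String) (hmem : s ∈ alphabet) :
    (pvAMap alphabet).get? (some s.toList)
      = some ((alphabet.length : Int) - (alphabet.reverse.idxOf s : Int)) := by
  unfold pvAMap
  rw [PySem.Dict.get?_insert]
  rw [if_neg (by simp)]
  rw [pv_enum_get? s alphabet 0 PySem.Dict.empty, if_pos hmem]
  ring_nf

lemma pv_ofList_map_length (f : String → Option (List Char))
    (hf : Function.Injective f) (l : List String) :
    (PySem.Set.ofList (l.map f)).length = (PySem.Set.ofList l).length := by
  have h1 : (PySem.Set.ofList (l.map f)).Perm ((PySem.Set.ofList l).map f) := by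
    apply List.perm_of_nodup_nodup_toFinset_eq
    · exact PySem.Set.nodup_ofList _
    · exact (PySem.Set.nodup_ofList _).map hf
    · apply Finset.ext
      intro x
      simp [PySem.Set.mem_ofList]
  rw [h1.length_eq, List.length_map]

lemma pv_aMap_size (alphabet : List String) :
    (pvAMap alphabet).size = (PySem.List.dedup alphabet).length + 1 := by
  have hkeys0 : (((PySem.List.enumerate alphabet).foldl
      (fun m p => m.insert (some p.2.toList) (p.1 + 1)) PySem.Dict.empty)).keys
      = PySem.Set.ofList ((PySem.List.enumerate alphabet).map (fun p => (some p.2.toList : Option (List Char)))) := by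
    rw [PySem.Dict.keys_foldl_insert_key (PySem.List.enumerate alphabet)
      (fun p => (some p.2.toList : Option (List Char))) (fun _ p => p.1 + 1) PySem.Dict.empty]
    rfl
  have hmm : (PySem.List.enumerate alphabet).map (fun p => (some p.2.toList : Option (List Char)))
      = alphabet.map (fun s => (some s.toList : Option (List Char))) := by
    rw [show (fun p : Int × String => (some p.2.toList : Option (List Char)))
        = (fun s : String => (some s.toList : Option (List Char))) ∘ (fun p : Int × String => p.2) from rfl,
      ← List.map_map, PySem.List.map_snd_enumerate]
  have hinj : Function.Injective (fun s : String => (some s.toList : Option (List Char))) := by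
    intro a b h
    have : a.toList = b.toList := by injection h
    have h2 := congrArg String.ofList this
    simpa [String.ofList_toList] using h2
  have hnc : (((PySem.List.enumerate alphabet).foldl
      (fun m p => m.insert (some p.2.toList) (p.1 + 1)) PySem.Dict.empty)).contains none = false := by
    rw [PySem.Dict.contains_eq_decide_mem_keys, hkeys0, hmm]
    simp only [decide_eq_false_iff_not]
    intro hn
    have := (PySem.Set.mem_ofList _ _).mp hn
    simp at this
  have hsz : (pvAMap alphabet).size
      = (((PySem.List.enumerate alphabet).foldl
        (fun m p => m.insert (some p.2.toList) (p.1 + 1)) PySem.Dict.empty)).size + 1 := by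
    unfold pvAMap
    simp [PySem.Dict.size, PySem.Dict.items_insert_of_not_contains _ _ hnc]
  rw [hsz]
  have hsz0 : ∀ (d : PySem.Dict (Option (List Char)) Int), d.size = d.keys.length := by
    intro d
    simp [PySem.Dict.size, PySem.Dict.keys]
  rw [hsz0, hkeys0, hmm, pv_ofList_map_length _ hinj alphabet, PySem.List.dedup_eq_ofList]

lemma pv_aMap_getD_none (alphabet : List String) :
    (pvAMap alphabet).getD none 0 = 0 := by
  unfold pvAMap
  exact PySem.Dict.getD_insert_self _ _ _ _

-- index bounds under the precondition ----------------------------------------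

lemma pv_idx_bounds (alphabet : List String) (k : Int) (d : String)
    (hd : ((PySem.Str.pyGet? d k).all (fun c =>
      decide (String.ofList [c] ∈ alphabet)
        && decide (pvLastIdx alphabet (String.ofList [c]) < (PySem.List.dedup alphabet).length))) = true) :
    0 ≤ pvIdx alphabet k d ∧ pvIdx alphabet k d < ((pvAMap alphabet).size : Int) := by
  have hsize : (pvAMap alphabet).size = (PySem.List.dedup alphabet).length + 1 :=
    pv_aMap_size alphabet
  unfold pvIdx
  split_ifs with hcond
  · rw [pv_aMap_getD_none]
    constructor
    · omega
    · rw [hsize]; push_cast; omega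
  · obtain ⟨c, hc⟩ : ∃ c, PySem.Str.pyGet? d k = some c := by
      cases hget : PySem.Str.pyGet? d k with
      | some c => exact ⟨c, rfl⟩
      | none =>
        exfalso
        have hnone : PySem.List.pyGet? d.toList k = none := by simpa using hget
        rw [PySem.List.pyGet?_eq_none_iff] at hnone
        apply hnone
        rw [PySem.Str.len_eq] at hcond
        push_neg at hcond
        simp only [PySem.Raise.InRange]
        omega
    rw [hc] at hd
    simp only [Option.all_some, Bool.and_eq_true, decide_eq_true_eq] at hd
    obtain ⟨hmem, hlast⟩ := hd
    have htl : (String.ofList [c] : String).toList = [c] := String.toList_ofList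
    rw [hc]
    simp only [Option.map_some]
    have hkeyeq : (some [c] : Option (List Char)) = some (String.ofList [c]).toList := by rw [htl]
    rw [hkeyeq, PySem.Dict.getD_eq_get?_getD, pv_aMap_get?_some alphabet _ hmem]
    simp only [Option.getD_some]
    have hrev : String.ofList [c] ∈ alphabet.reverse := List.mem_reverse.mpr hmem
    have hidxlt : alphabet.reverse.idxOf (String.ofList [c]) < alphabet.reverse.length :=
      List.idxOf_lt_length_of_mem hrev
    rw [List.length_reverse] at hidxlt
    rw [pvLastIdx] at hlast
    constructor
    · omega
    · rw [hsize]; push_cast; omega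

-- assembling the two ports ---------------------------------------------------

lemma pv_key_eq (alphabet : List String) (k : Int) (d : String)
    (hd : ((PySem.Str.pyGet? d k).all (fun c =>
      decide (String.ofList [c] ∈ alphabet)
        && decide (pvLastIdx alphabet (String.ofList [c]) < (PySem.List.dedup alphabet).length))) = true) :
    pvIdx alphabet k d = ((pvKey alphabet k d : Nat) : Int)
      ∧ pvKey alphabet k d < (pvAMap alphabet).size := by
  obtain ⟨h0, h1⟩ := pv_idx_bounds alphabet k d hd
  constructor
  · rw [pvKey, Int.toNat_of_nonneg h0]
  · rw [pvKey]; omega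

lemma pv_key_none (alphabet : List String) (k : Int) (d : String)
    (hcond : k < -(PySem.Str.len d) ∨ PySem.Str.len d - 1 < k) :
    (pvAMap alphabet).getD none 0 = pvIdx alphabet k d := by
  rw [pvIdx, if_pos hcond]

lemma pv_key_some (alphabet : List String) (k : Int) (d : String)
    (hcond : ¬ (k < -(PySem.Str.len d) ∨ PySem.Str.len d - 1 < k)) :
    (pvAMap alphabet).getD ((PySem.Str.pyGet? d k).map (fun c => [c])) 0 = pvIdx alphabet k d := by
  rw [pvIdx, if_neg hcond]

lemma pv_foldl_flatten {α : Type} (l : List (List α)) :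
    l.foldl (fun acc b => acc ++ b) [] = l.flatten := by
  rw [PySem.List.foldl_append_eq_flatMap (fun b => b) l []]
  simp

lemma pv_portA_eq (data alphabet : List String) (k : Int) (hmem : ∀ d ∈ data, ((PySem.Str.pyGet? d k).all (fun c =>
      decide (String.ofList [c] ∈ alphabet)
        && decide (pvLastIdx alphabet (String.ofList [c]) < (PySem.List.dedup alphabet).length))) = true) :
    RadixSortIndex_py data alphabet k
      = ((List.range (pvAMap alphabet).size).map
          (fun i => data.filter (fun x => pvKey alphabet k x == i))).flatten := by
  have hkey : ∀ d ∈ data, pvIdx alphabet k d = ((pvKey alphabet k d : Nat) : Int)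
      ∧ pvKey alphabet k d < (pvAMap alphabet).size :=
    fun d hd => pv_key_eq alphabet k d (hmem d hd)
  have hkm : ∀ d ∈ data, pvKey alphabet k d < (pvAMap alphabet).size :=
    fun d hd => (hkey d hd).2
  simp only [RadixSortIndex_py]
  -- the counting loop
  rw [pv_replicate_eq_map (pvAMap alphabet).size (0 : Int)]
  rw [PySem.List.foldl_congr_mem data _
    (fun ps d => PySem.List.pySetD ps ((pvKey alphabet k d : Nat) : Int)
      ((fun (a : Int) (_ : String) => a + 1)
        (PySem.List.pyGetD ps ((pvKey alphabet k d : Nat) : Int) (0 : Int)) d)) _ ?hcg1]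
  case hcg1 =>
    intro ps d hd
    by_cases hcond : k < -(PySem.Str.len d) ∨ PySem.Str.len d - 1 < k
    · rw [if_pos hcond, pv_key_none alphabet k d hcond, (hkey d hd).1]
    · rw [if_neg hcond, pv_key_some alphabet k d hcond, (hkey d hd).1]
  rw [pv_foldl_key (pvKey alphabet k) (pvAMap alphabet).size
    (fun (a : Int) (_ : String) => a + 1) 0 data (fun _ => 0) hkm]
  have hcounts : (List.range (pvAMap alphabet).size).map
        (fun i => (data.filter (fun x => pvKey alphabet k x == i)).foldl
          (fun (a : Int) (_ : String) => a + 1) ((fun _ => (0 : Int)) i))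
      = (List.range (pvAMap alphabet).size).map
        (fun i => ((pvCnt (pvKey alphabet k) data i : Nat) : Int)) := by
    apply List.map_congr_left
    intro i _
    rw [pv_foldl_count]
    simp [pvCnt]
  rw [hcounts]
  -- the prefix-sum loop
  have hlenpos : ((List.range (pvAMap alphabet).size).map
      (fun i => ((pvCnt (pvKey alphabet k) data i : Nat) : Int))).length
      = (pvAMap alphabet).size := by simp
  rw [hlenpos]
  have hinit : (List.range (pvAMap alphabet).size).map
        (fun i => ((pvCnt (pvKey alphabet k) data i : Nat) : Int))
      = (List.range (pvAMap alphabet).size).map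
        (fun i => if i < 0 then ((pvOff (pvCnt (pvKey alphabet k) data) i : Nat) : Int)
          else ((pvCnt (pvKey alphabet k) data i : Nat) : Int)) := by
    apply List.map_congr_left
    intro i _
    simp
  rw [hinit]
  have hpref := pv_prefix (pvCnt (pvKey alphabet k) data) (pvAMap alphabet).size
    (pvAMap alphabet).size 0 (by omega)
  rw [show ((pvOff (pvCnt (pvKey alphabet k) data) 0 : Nat) : Int) = (0 : Int) from by
    simp [pvOff]] at hpref
  rw [Nat.cast_zero] at hpref
  rw [hpref]
  -- the placement loop
  have hres : List.replicate data.length (none : Option String)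
      = pvSegs (pvKey alphabet k) (pvCnt (pvKey alphabet k) data) [] 0 (pvAMap alphabet).size := by
    rw [pvSegs]
    have hsegnil : (List.range' 0 (pvAMap alphabet).size).map
          (pvSeg (pvKey alphabet k) (pvCnt (pvKey alphabet k) data) [])
        = (List.range' 0 (pvAMap alphabet).size).map
          (fun i => List.replicate (pvCnt (pvKey alphabet k) data i) (none : Option String)) := by
      apply List.map_congr_left
      intro i _
      simp [pvSeg, pvCnt]
    rw [hsegnil, pv_flatten_replicate]
    congr 1
    rw [← List.range_eq_range', pv_sum_cnt (pvKey alphabet k) (pvAMap alphabet).size data hkm]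
  rw [hres]
  have hpos0 : (List.range (pvAMap alphabet).size).map
        (fun i => ((pvOff (pvCnt (pvKey alphabet k) data) i : Nat) : Int))
      = (List.range (pvAMap alphabet).size).map
        (fun i => ((pvOff (pvCnt (pvKey alphabet k) data) i
          + pvCnt (pvKey alphabet k) ([] : List String) i : Nat) : Int)) := by
    apply List.map_congr_left
    intro i _
    simp [pvCnt]
  rw [hpos0]
  rw [PySem.List.foldl_congr_mem data _
    (fun (st : List (Option String) × List Int) d =>
      (PySem.List.pySetD st.1
          (PySem.List.pyGetD st.2 ((pvKey alphabet k d : Nat) : Int) 0) (some d),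
        PySem.List.pySetD st.2 ((pvKey alphabet k d : Nat) : Int)
          (PySem.List.pyGetD st.2 ((pvKey alphabet k d : Nat) : Int) 0 + 1))) _ ?hcg2]
  case hcg2 =>
    intro st d hd
    by_cases hcond : k < -(PySem.Str.len d) ∨ PySem.Str.len d - 1 < k
    · rw [if_pos hcond, pv_key_none alphabet k d hcond, (hkey d hd).1]
    · rw [if_neg hcond, pv_key_some alphabet k d hcond, (hkey d hd).1]
  rw [pv_place (pvKey alphabet k) (pvAMap alphabet).size (pvCnt (pvKey alphabet k) data)
    (fun j hj => pv_off_mono (pvCnt (pvKey alphabet k) data) (j + 1) (pvAMap alphabet).size (by omega))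
    (by rw [pvOff, List.range_eq_range'])
    data [] hkm (by intro i; simp [pvCnt])]
  -- read off the fully-filled segments
  simp only [List.nil_append]
  rw [pvSegs, List.map_flatten, ← List.range_eq_range', List.map_map]
  congr 1
  apply List.map_congr_left
  intro i _
  have : pvCnt (pvKey alphabet k) data i - pvCnt (pvKey alphabet k) data i = 0 := by omega
  simp [pvSeg, Function.comp, this, List.map_map, Function.comp_def]

lemma pv_portB_eq (data alphabet : List String) (k : Int) (hmem : ∀ d ∈ data, ((PySem.Str.pyGet? d k).all (fun c =>
      decide (String.ofList [c] ∈ alphabet)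
        && decide (pvLastIdx alphabet (String.ofList [c]) < (PySem.List.dedup alphabet).length))) = true) :
    RadixSortIndex_py_alt data alphabet k
      = ((List.range (pvAMap alphabet).size).map
          (fun i => data.filter (fun x => pvKey alphabet k x == i))).flatten := by
  have hkey : ∀ d ∈ data, pvIdx alphabet k d = ((pvKey alphabet k d : Nat) : Int)
      ∧ pvKey alphabet k d < (pvAMap alphabet).size :=
    fun d hd => pv_key_eq alphabet k d (hmem d hd)
  have hkm : ∀ d ∈ data, pvKey alphabet k d < (pvAMap alphabet).size :=
    fun d hd => (hkey d hd).2
  simp only [RadixSortIndex_py_alt]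
  rw [pv_replicate_eq_map (pvAMap alphabet).size ([] : List String)]
  rw [PySem.List.foldl_congr_mem data _
    (fun bs d => PySem.List.pySetD bs ((pvKey alphabet k d : Nat) : Int)
      ((fun (a : List String) (x : String) => a ++ [x])
        (PySem.List.pyGetD bs ((pvKey alphabet k d : Nat) : Int) ([] : List String)) d)) _ ?hcg]
  case hcg =>
    intro bs d hd
    by_cases hcond : k < -(PySem.Str.len d) ∨ PySem.Str.len d - 1 < k
    · rw [if_pos hcond, pv_key_none alphabet k d hcond, (hkey d hd).1]
    · rw [if_neg hcond, pv_key_some alphabet k d hcond, (hkey d hd).1]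
  rw [pv_foldl_key (pvKey alphabet k) (pvAMap alphabet).size
    (fun (a : List String) (x : String) => a ++ [x]) [] data (fun _ => []) hkm]
  rw [pv_foldl_flatten]
  congr 1
  apply List.map_congr_left
  intro i _
  rw [pv_foldl_app]
  simp

-- ===== VERDICT (by name: the statement is the Claim_ definition above) =====
theorem RadixSortIndex_py_spec : Claim_equal_RadixSortIndex_py := by
  intro data alphabet k _ hpre
  unfold Spec_RadixSortIndex_py
  rw [pv_portA_eq data alphabet k hpre, pv_portB_eq data alphabet k hpre]
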